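-- pv_equiv track=rewrite | github.com/IAjimi/AdventOfCode | AOC10.py | create_path_dict
-- ===== SOURCE A (Python) =====
-- def create_path_dict(_input):
--     travel_dict = {}
--
--     for i in _input:
--         dest = []
--
--         if i + 1 in _input:
--             dest.append(i + 1)
--         if i + 2 in _input:
--             dest.append(i + 2)
--         if i + 3 in _input:
--             dest.append(i + 3)
--
--         travel_dict[i] = dest
--
--     return travel_dict
-- ===== SOURCE B (Python) =====
-- def create_path_dict(_input):
--     # push pass: init every key to an empty list, then walk values ascending and append
--     travel_dict = {i: [] for i in _input}
--     for j in sorted(set(_input)):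
--         for d in (1, 2, 3):
--             if j - d in travel_dict:
--                 travel_dict[j - d].append(j)
--     return travel_dict
-- ===== Notes on version B (the rewrite author's own statement) =====
-- stated objective: faster
-- what changed: Replaced the pull pass with three O(n) list-membership scans per element by a push pass over a set: initialize every key to an empty list, then iterate sorted(set(_input)) and append j to travel_dict[j-d] via O(1) dict membership.
import Mathlib
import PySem

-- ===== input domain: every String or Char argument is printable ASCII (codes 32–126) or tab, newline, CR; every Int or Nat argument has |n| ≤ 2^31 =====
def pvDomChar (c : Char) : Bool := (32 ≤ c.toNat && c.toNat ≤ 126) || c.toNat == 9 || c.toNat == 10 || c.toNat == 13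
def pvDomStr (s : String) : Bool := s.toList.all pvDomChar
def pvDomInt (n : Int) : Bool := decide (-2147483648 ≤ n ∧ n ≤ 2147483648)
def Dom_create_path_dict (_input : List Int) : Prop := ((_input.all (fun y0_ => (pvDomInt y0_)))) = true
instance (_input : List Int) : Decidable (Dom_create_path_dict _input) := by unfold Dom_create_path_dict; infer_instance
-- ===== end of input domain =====

-- B replaces A's pull pass (three linear membership scans per element) by an O(n log n)
-- push pass: every key starts with an empty successor list, then the sorted distinct values are pushed onto
-- their up-to-three predecessors via dict membership.

-- ===== PORT A =====
def create_path_dict (_input : List Int) : List (Int × List Int) :=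
  (_input.foldl (fun (travel_dict : PySem.Dict Int (List Int)) i =>
      let dest : List Int := []
      let dest := if i + 1 ∈ _input then dest ++ [i + 1] else dest
      let dest := if i + 2 ∈ _input then dest ++ [i + 2] else dest
      let dest := if i + 3 ∈ _input then dest ++ [i + 3] else dest
      travel_dict.insert i dest) PySem.Dict.empty).items

-- ===== PORT B =====
def create_path_dict_alt (_input : List Int) : List (Int × List Int) :=
  let travel_dict := _input.foldl
      (fun (d : PySem.Dict Int (List Int)) i => d.insert i ([] : List Int)) PySem.Dict.empty
  let travel_dict := (PySem.List.sorted (PySem.Set.ofList _input) (fun x => x) false).foldl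
      (fun d j => [(1 : Int), 2, 3].foldl
        (fun d dd => if d.contains (j - dd) then d.modify (j - dd) [] (fun xs => xs ++ [j]) else d)
        d) travel_dict
  travel_dict.items

-- ===== PRECONDITION & SPEC =====
def Spec_create_path_dict (_input : List Int) (out : List (Int × List Int)) : Prop := out = create_path_dict_alt _input
instance (_input : List Int) (out : List (Int × List Int)) : Decidable (Spec_create_path_dict _input out) := by unfold Spec_create_path_dict; infer_instance

-- ===== CLAIM (what is proved, stated in full; the proofs are below) =====
def Claim_equal_create_path_dict : Prop := ∀ (_input : List Int), Dom_create_path_dict _input → Spec_create_path_dict _input (create_path_dict _input)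

-- ===== LEMMAS AND PROOFS =====

-- the successor list both programs associate with key k
def pvDest (l : List Int) (k : Int) : List Int :=
  (if k + 1 ∈ l then [k + 1] else []) ++ (if k + 2 ∈ l then [k + 2] else []) ++
    (if k + 3 ∈ l then [k + 3] else [])

-- the predicate "j is one of k's successors"
def pvSucc (k j : Int) : Bool := decide (j = k + 1) || decide (j = k + 2) || decide (j = k + 3)

-- A's dest-chain is pvDest
theorem pvDest_chain (l : List Int) (i : Int) :
    (let dest : List Int := []
     let dest := if i + 1 ∈ l then dest ++ [i + 1] else dest
     let dest := if i + 2 ∈ l then dest ++ [i + 2] else dest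
     let dest := if i + 3 ∈ l then dest ++ [i + 3] else dest
     dest) = pvDest l i := by
  simp only [pvDest]
  split_ifs <;> simp

-- a fold of inserts whose value depends only on the key: last write wins, all writes agree
theorem getD_foldl_insert_fun (v : Int → List Int) (l : List Int)
    (d : PySem.Dict Int (List Int)) (k : Int) :
    (l.foldl (fun d i => d.insert i (v i)) d).getD k [] =
      if k ∈ l then v k else d.getD k [] := by
  induction l generalizing d with
  | nil => simp
  | cons a t ih =>
    simp only [List.foldl_cons, ih, List.mem_cons]
    by_cases hk : k ∈ t
    · simp [hk]
    · by_cases ha : k = a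
      · simp [ha, PySem.Dict.getD_insert_self]
      · simp [ha, PySem.Dict.getD_insert_of_ne _ _ _ ha]

-- one guarded-modify step of B: keys unchanged, value grows iff k = j - dd and k is a key
theorem pvStepB (d : PySem.Dict Int (List Int)) (j dd k : Int) :
    ((if d.contains (j - dd) then d.modify (j - dd) [] (fun xs => xs ++ [j]) else d).keys = d.keys)
    ∧ ((if d.contains (j - dd) then d.modify (j - dd) [] (fun xs => xs ++ [j]) else d).getD k []
        = d.getD k [] ++ (if k = j - dd ∧ k ∈ d.keys then [j] else [])) := by
  by_cases hc : d.contains (j - dd) = true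
  · have hmem : j - dd ∈ d.keys := (PySem.Dict.contains_iff_mem_keys d _).mp hc
    constructor
    · simp [hc, PySem.Dict.keys_modify, PySem.Dict.keys_insert_of_contains _ _ hc]
    · simp only [hc, if_true, PySem.Dict.getD_modify]
      by_cases hk : k = j - dd
      · simp [hk, hmem]
      · simp [hk]
  · have hmem : ¬ (j - dd ∈ d.keys) := fun h => hc ((PySem.Dict.contains_iff_mem_keys d _).mpr h)
    constructor
    · simp [hc]
    · by_cases hk : k = j - dd
      · simp [hc, hk, hmem]
      · simp [hc, hk]

-- the inner (1,2,3) loop of B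
theorem pvInnerB (d : PySem.Dict Int (List Int)) (j k : Int) :
    (([(1 : Int), 2, 3].foldl
        (fun d dd => if d.contains (j - dd) then d.modify (j - dd) [] (fun xs => xs ++ [j]) else d)
        d).keys = d.keys)
    ∧ (([(1 : Int), 2, 3].foldl
        (fun d dd => if d.contains (j - dd) then d.modify (j - dd) [] (fun xs => xs ++ [j]) else d)
        d).getD k []
        = d.getD k [] ++ (if pvSucc k j = true ∧ k ∈ d.keys then [j] else [])) := by
  simp only [List.foldl_cons, List.foldl_nil]
  obtain ⟨hK1, hV1⟩ := pvStepB d j 1 k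
  obtain ⟨hK2, hV2⟩ := pvStepB (if d.contains (j - 1) then d.modify (j - 1) [] (fun xs => xs ++ [j]) else d) j 2 k
  obtain ⟨hK3, hV3⟩ := pvStepB (if (if d.contains (j - 1) then d.modify (j - 1) [] (fun xs => xs ++ [j]) else d).contains (j - 2) then (if d.contains (j - 1) then d.modify (j - 1) [] (fun xs => xs ++ [j]) else d).modify (j - 2) [] (fun xs => xs ++ [j]) else (if d.contains (j - 1) then d.modify (j - 1) [] (fun xs => xs ++ [j]) else d)) j 3 k
  refine ⟨by rw [hK3, hK2, hK1], ?_⟩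
  rw [hV3, hK2, hK1, hV2, hK1, hV1]
  simp only [pvSucc]
  by_cases h1 : k = j - 1 <;> by_cases h2 : k = j - 2 <;> by_cases h3 : k = j - 3 <;>
    by_cases hm : k ∈ d.keys <;> simp_all <;> omega

-- the outer loop of B over a list S of values
theorem pvOuterB (S : List Int) (d : PySem.Dict Int (List Int)) (k : Int) :
    ((S.foldl (fun d j => [(1 : Int), 2, 3].foldl
        (fun d dd => if d.contains (j - dd) then d.modify (j - dd) [] (fun xs => xs ++ [j]) else d)
        d) d).keys = d.keys)
    ∧ (k ∈ d.keys →
      (S.foldl (fun d j => [(1 : Int), 2, 3].foldl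
        (fun d dd => if d.contains (j - dd) then d.modify (j - dd) [] (fun xs => xs ++ [j]) else d)
        d) d).getD k [] = d.getD k [] ++ S.filter (pvSucc k)) := by
  induction S generalizing d with
  | nil => simp
  | cons j t ih =>
    obtain ⟨hK, hV⟩ := pvInnerB d j k
    obtain ⟨ihK, ihV⟩ := ih ([(1 : Int), 2, 3].foldl
        (fun d dd => if d.contains (j - dd) then d.modify (j - dd) [] (fun xs => xs ++ [j]) else d) d)
    refine ⟨by rw [List.foldl_cons, ihK, hK], ?_⟩
    intro hmem
    rw [List.foldl_cons, ihV (by rw [hK]; exact hmem), hV, List.filter_cons]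
    by_cases hs : pvSucc k j = true
    · simp [hs, hmem]
    · simp [hs, hmem]

-- filtering successors out of a strictly increasing list gives them smallest-first
theorem pvFilter_sorted (S : List Int) (hp : S.Pairwise (· < ·)) (k : Int) :
    S.filter (pvSucc k) =
      (if k + 1 ∈ S then [k + 1] else []) ++ (if k + 2 ∈ S then [k + 2] else []) ++
        (if k + 3 ∈ S then [k + 3] else []) := by
  induction S with
  | nil => simp
  | cons x t ih =>
    have hx : ∀ y ∈ t, x < y := fun y hy => List.rel_of_pairwise_cons hp hy
    have ht := ih (List.Pairwise.sublist (List.sublist_cons_self x t) hp)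
    rw [List.filter_cons, ht]
    by_cases h1 : x = k + 1
    · have n1 : k + 1 ∉ t := fun h => by have := hx _ h; omega
      have hs : pvSucc k x = true := by simp [pvSucc, h1]
      have e2 : (k + 2 : Int) ≠ k + 1 := by omega
      have e3 : (k + 3 : Int) ≠ k + 1 := by omega
      simp [hs, h1, List.mem_cons, n1, e2, e3, pvSucc]
    · by_cases h2 : x = k + 2
      · have n1 : k + 1 ∉ t := fun h => by have := hx _ h; omega
        have n2 : k + 2 ∉ t := fun h => by have := hx _ h; omega
        have hs : pvSucc k x = true := by simp [pvSucc, h2]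
        have e1 : (k + 1 : Int) ≠ k + 2 := by omega
        have e3 : (k + 3 : Int) ≠ k + 2 := by omega
        simp [hs, h2, List.mem_cons, n1, n2, e1, e3, pvSucc]
      · by_cases h3 : x = k + 3
        · have n1 : k + 1 ∉ t := fun h => by have := hx _ h; omega
          have n2 : k + 2 ∉ t := fun h => by have := hx _ h; omega
          have n3 : k + 3 ∉ t := fun h => by have := hx _ h; omega
          have hs : pvSucc k x = true := by simp [pvSucc, h3]
          have e1 : (k + 1 : Int) ≠ k + 3 := by omega
          have e2 : (k + 2 : Int) ≠ k + 3 := by omega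
          simp [hs, h3, List.mem_cons, n1, n2, n3, e1, e2, pvSucc]
        · have hs : pvSucc k x = false := by
            simp only [pvSucc, Bool.or_eq_false_iff, decide_eq_false_iff_not]
            omega
          have e1 : ¬ (k + 1 = x) := fun h => h1 h.symm
          have e2 : ¬ (k + 2 = x) := fun h => h2 h.symm
          have e3 : ¬ (k + 3 = x) := fun h => h3 h.symm
          simp [hs, List.mem_cons, e1, e2, e3]

-- ===== VERDICT (by name: the statement is the Claim_ definition above) =====
theorem create_path_dict_spec : Claim_equal_create_path_dict := by
  intro l _
  unfold Spec_create_path_dict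
  have hfun : (fun (d : PySem.Dict Int (List Int)) i => d.insert i
      (let dest : List Int := []
       let dest := if i + 1 ∈ l then dest ++ [i + 1] else dest
       let dest := if i + 2 ∈ l then dest ++ [i + 2] else dest
       let dest := if i + 3 ∈ l then dest ++ [i + 3] else dest
       dest)) = fun (d : PySem.Dict Int (List Int)) i => d.insert i (pvDest l i) := by
    funext d i; rw [pvDest_chain]
  have hA : create_path_dict l =
      (l.foldl (fun (d : PySem.Dict Int (List Int)) i => d.insert i (pvDest l i))
        PySem.Dict.empty).items := by
    rw [create_path_dict, hfun]
  set dA := l.foldl (fun (d : PySem.Dict Int (List Int)) i => d.insert i (pvDest l i))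
      PySem.Dict.empty with hdA
  set d0 := l.foldl (fun (d : PySem.Dict Int (List Int)) i => d.insert i ([] : List Int))
      PySem.Dict.empty with hd0
  set S := PySem.List.sorted (PySem.Set.ofList l) (fun x => x) false with hS
  set dB := S.foldl (fun d j => [(1 : Int), 2, 3].foldl
      (fun d dd => if d.contains (j - dd) then d.modify (j - dd) [] (fun xs => xs ++ [j]) else d)
      d) d0 with hdB
  have hB : create_path_dict_alt l = dB.items := rfl
  have hkA : dA.keys = PySem.Set.ofList l := by
    rw [hdA, PySem.Dict.keys_foldl_insert l (fun _ i => pvDest l i)]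
    simp [PySem.Set.update_nil_left]
  have hk0 : d0.keys = PySem.Set.ofList l := by
    rw [hd0, PySem.Dict.keys_foldl_insert l (fun _ _ => ([] : List Int))]
    simp [PySem.Set.update_nil_left]
  have hkB : dB.keys = PySem.Set.ofList l := by
    rw [hdB, (pvOuterB S d0 0).1, hk0]
  have hndA : dA.keys.Nodup := by rw [hkA]; exact PySem.Set.nodup_ofList l
  have hndB : dB.keys.Nodup := by rw [hkB]; exact PySem.Set.nodup_ofList l
  rw [hA, hB, PySem.Dict.items_eq_map_keys dA hndA [], PySem.Dict.items_eq_map_keys dB hndB [],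
    hkA, hkB]
  apply List.map_congr_left
  intro k hk
  have hkl : k ∈ l := (PySem.Set.mem_ofList l k).mp hk
  have hvA : dA.getD k [] = pvDest l k := by
    rw [hdA, getD_foldl_insert_fun (fun i => pvDest l i) l PySem.Dict.empty k]
    simp [hkl]
  have hv0 : d0.getD k [] = [] := by
    rw [hd0, getD_foldl_insert_fun (fun _ => ([] : List Int)) l PySem.Dict.empty k]
    simp
  have hvB : dB.getD k [] = pvDest l k := by
    rw [hdB, (pvOuterB S d0 k).2 (by rw [hk0]; exact hk), hv0,
      pvFilter_sorted S (PySem.List.sorted_ofList_pairwise_lt l) k]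
    simp only [pvDest, hS, PySem.List.mem_sorted, PySem.Set.mem_ofList, List.nil_append]
  rw [hvA, hvB]
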